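-- pv_equiv track=rewrite | github.com/0ai-Cyberviser/Hancock | collectors/osint_guardrails.py | _host_matches_allowlist
-- ===== SOURCE A (Python) =====
-- def _host_matches_allowlist(hostname: str, allowed_hosts: list[str]) -> bool:
--     lowered = hostname.lower()
--     for allowed in allowed_hosts:
--         candidate = allowed.lower().strip()
--         if not candidate:
--             continue
--         if lowered == candidate or lowered.endswith(f".{candidate}"):
--             return True
--     return False
-- ===== SOURCE B (Python) =====
-- def _host_matches_allowlist(hostname: str, allowed_hosts: list[str]) -> bool:
--     allowed = set()
--     for entry in allowed_hosts:
--         c = entry.lower().strip()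
--         if c:
--             allowed.add(c)
--     lowered = hostname.lower()
--     if lowered in allowed:
--         return True
--     for i, ch in enumerate(lowered):
--         if ch == '.' and lowered[i + 1:] in allowed:
--             return True
--     return False
-- ===== Notes on version B (the rewrite author's own statement) =====
-- stated objective: alternative
-- what changed: B normalizes the allowlist once into a set and then enumerates the hostname's dot-boundary suffixes with set lookups, instead of scanning the allowlist and doing an equality/endswith test per entry.
import Mathlib
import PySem

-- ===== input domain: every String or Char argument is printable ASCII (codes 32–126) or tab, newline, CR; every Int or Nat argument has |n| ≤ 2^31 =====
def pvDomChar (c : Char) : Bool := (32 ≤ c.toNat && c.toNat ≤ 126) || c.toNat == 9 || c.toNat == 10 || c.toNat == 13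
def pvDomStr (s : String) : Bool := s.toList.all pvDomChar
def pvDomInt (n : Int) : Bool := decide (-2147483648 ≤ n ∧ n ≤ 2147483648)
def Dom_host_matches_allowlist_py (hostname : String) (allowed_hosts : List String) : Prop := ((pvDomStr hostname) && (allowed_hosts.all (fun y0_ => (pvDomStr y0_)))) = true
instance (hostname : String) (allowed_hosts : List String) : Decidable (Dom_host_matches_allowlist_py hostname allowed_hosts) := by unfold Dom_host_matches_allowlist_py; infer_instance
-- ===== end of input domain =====

-- B replaces A's per-entry equality/endswith scan by a one-time normalized-entry set
-- plus enumeration of the hostname's dot-boundary suffixes (objective: alternative).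

-- ===== PORT A =====
-- the for-loop of A with its early return, as structural recursion over the allowlist
def pvALoop (lowered : String) : List String → Bool
  | [] => false
  | allowed :: rest =>
    let candidate := PySem.Str.strip (PySem.Str.lower allowed)
    if candidate == "" then pvALoop lowered rest
    else if lowered == candidate || PySem.Str.endswith lowered ("." ++ candidate) then true
    else pvALoop lowered rest

def host_matches_allowlist_py (hostname : String) (allowed_hosts : List String) : Bool :=
  pvALoop (PySem.Str.lower hostname) allowed_hosts

-- ===== PORT B =====
-- Source B's first loop: build the set of non-empty normalized allowlist entries
def pvBuild (allowed_hosts : List String) : PySem.Set String :=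
  allowed_hosts.foldl
    (fun s entry =>
      let c := PySem.Str.strip (PySem.Str.lower entry)
      if c == "" then s else s.add c)
    (PySem.Set.ofList ([] : List String))

def host_matches_allowlist_py_alt (hostname : String) (allowed_hosts : List String) : Bool :=
  let allowed := pvBuild allowed_hosts
  let lowered := PySem.Str.lower hostname
  if allowed.contains lowered then true
  else
    (PySem.List.enumerate lowered.toList).any
      (fun p => p.2 == '.' && allowed.contains (PySem.Str.slice lowered (some (p.1 + 1)) none))

-- ===== PRECONDITION & SPEC =====
def Spec_host_matches_allowlist_py (hostname : String) (allowed_hosts : List String) (out : Bool) : Prop := out = host_matches_allowlist_py_alt hostname allowed_hosts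
instance (hostname : String) (allowed_hosts : List String) (out : Bool) : Decidable (Spec_host_matches_allowlist_py hostname allowed_hosts out) := by unfold Spec_host_matches_allowlist_py; infer_instance

-- ===== CLAIM (what is proved, stated in full; the proofs are below) =====
def Claim_equal_host_matches_allowlist_py : Prop := ∀ (hostname : String) (allowed_hosts : List String), Dom_host_matches_allowlist_py hostname allowed_hosts → Spec_host_matches_allowlist_py hostname allowed_hosts (host_matches_allowlist_py hostname allowed_hosts)

-- ===== LEMMAS AND PROOFS =====

def pvNorm (a : String) : String := PySem.Str.strip (PySem.Str.lower a)

-- the common characterization both loops are proved equivalent to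
def pvHit (l : String) (hs : List String) : Prop :=
  ∃ a ∈ hs, pvNorm a ≠ "" ∧
    (l = pvNorm a ∨ PySem.Chars.endswith l.toList ('.' :: (pvNorm a).toList) = true)

-- A's loop hits iff some entry normalizes to l or to a ".suffix" of l
theorem pvALoop_iff (l : String) (hs : List String) :
    pvALoop l hs = true ↔ pvHit l hs := by
  induction hs with
  | nil => simp [pvALoop, pvHit]
  | cons a rest ih =>
    simp only [pvALoop, pvHit, pvNorm] at *
    by_cases hc : PySem.Str.strip (PySem.Str.lower a) = ""
    · simp [hc, ih]
    · have hts : ("." ++ PySem.Str.strip (PySem.Str.lower a)).toList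
          = '.' :: (PySem.Str.strip (PySem.Str.lower a)).toList := by
        simp [String.toList_append]
      rw [if_neg (by simpa using hc)]
      by_cases hd : (l == PySem.Str.strip (PySem.Str.lower a)
          || PySem.Str.endswith l ("." ++ PySem.Str.strip (PySem.Str.lower a))) = true
      · rw [if_pos hd]
        simp only [Bool.or_eq_true, beq_iff_eq, PySem.Str.endswith_eq, hts] at hd
        simp only [List.mem_cons, true_iff]
        exact ⟨a, Or.inl rfl, hc, by simpa using hd⟩
      · rw [if_neg hd]
        simp only [Bool.or_eq_true, beq_iff_eq, PySem.Str.endswith_eq, hts,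
          not_or, Bool.not_eq_true] at hd
        simp only [ih, List.mem_cons]
        constructor
        · rintro ⟨b, hb, h⟩; exact ⟨b, Or.inr hb, h⟩
        · rintro ⟨b, hb | hb, hne, hcase⟩
          · subst hb
            rcases hcase with h | h
            · exact absurd h (by simpa using hd.1)
            · rw [show PySem.Chars.endswith l.toList
                  ('.' :: (PySem.Str.strip (PySem.Str.lower b)).toList) = false
                  from (by simpa using hd.2)] at h
              exact absurd h (by simp)
          · exact ⟨b, hb, hne, hcase⟩

-- membership in the set B builds
theorem pvMem_build (hs : List String) (x : String) :
    x ∈ pvBuild hs ↔ ∃ a ∈ hs, pvNorm a ≠ "" ∧ x = pvNorm a := by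
  unfold pvBuild
  suffices h : ∀ (s : PySem.Set String),
      (x ∈ hs.foldl (fun s entry =>
        let c := PySem.Str.strip (PySem.Str.lower entry)
        if c == "" then s else s.add c) s ↔
      x ∈ s ∨ ∃ a ∈ hs, pvNorm a ≠ "" ∧ x = pvNorm a) by
    rw [h]; simp
  induction hs with
  | nil => intro s; simp
  | cons a rest ih =>
    intro s
    simp only [List.foldl_cons, pvNorm] at *
    by_cases hc : PySem.Str.strip (PySem.Str.lower a) = ""
    · rw [if_pos (by simpa using hc), ih]
      simp [hc]
    · rw [if_neg (by simpa using hc), ih]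
      simp only [PySem.Set.mem_add, List.mem_cons]
      constructor
      · rintro (⟨h | h⟩ | ⟨b, hb, h⟩)
        · exact Or.inl h
        · exact Or.inr ⟨a, Or.inl rfl, hc, h⟩
        · exact Or.inr ⟨b, Or.inr hb, h⟩
      · rintro (h | ⟨b, hb | hb, h⟩)
        · exact Or.inl (Or.inl h)
        · subst hb; exact Or.inl (Or.inr h.2)
        · exact Or.inr ⟨b, hb, h⟩

-- membership in enumerate
theorem pvMem_enumerate {α : Type} (xs : List α) (k : Int) (p : Int × α) :
    p ∈ PySem.List.enumerate xs k ↔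
      ∃ i : Nat, i < xs.length ∧ p.1 = k + i ∧ xs[i]? = some p.2 := by
  induction xs generalizing k with
  | nil => simp [PySem.List.enumerate]
  | cons x t ih =>
    simp only [PySem.List.enumerate, List.mem_cons, ih]
    constructor
    · rintro (h | ⟨i, hi, h1, h2⟩)
      · exact ⟨0, by simp, by simp [h], by simp [h]⟩
      · exact ⟨i + 1, by simpa using hi, by push_cast; omega,
          by simpa using h2⟩
    · rintro ⟨i, hi, h1, h2⟩
      cases i with
      | zero =>
        left
        simp only [List.getElem?_cons_zero, Option.some.injEq] at h2
        simp only [Nat.cast_zero, add_zero] at h1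
        obtain ⟨p1, p2⟩ := p
        simp_all
      | succ j =>
        right
        exact ⟨j, by simpa using hi, by push_cast at h1 ⊢; omega, by simpa using h2⟩

-- l ends with "." ++ c iff c is the tail after some '.' of l
theorem pvEndswith_dot_iff (cs c : List Char) :
    PySem.Chars.endswith cs ('.' :: c) = true ↔
      ∃ i : Nat, i < cs.length ∧ cs[i]? = some '.' ∧ cs.drop (i + 1) = c := by
  rw [PySem.Chars.endswith_iff]
  constructor
  · rintro ⟨p, hp⟩
    subst hp
    refine ⟨p.length, by simp, by simp, ?_⟩
    simp
  · rintro ⟨i, hi, hget, hdrop⟩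
    refine ⟨cs.take i, ?_⟩
    have h2 : cs.drop i = '.' :: cs.drop (i + 1) := by
      obtain ⟨h, hv⟩ := List.getElem?_eq_some_iff.mp hget
      rw [List.drop_eq_getElem_cons hi]
      simp [hv]
    calc cs.take i ++ '.' :: c = cs.take i ++ cs.drop i := by rw [h2, hdrop]
    _ = cs := List.take_append_drop i cs

-- B hits the same characterization
theorem pvAlt_iff (hostname : String) (hs : List String) :
    host_matches_allowlist_py_alt hostname hs = true ↔ pvHit (PySem.Str.lower hostname) hs := by
  unfold host_matches_allowlist_py_alt
  set l := PySem.Str.lower hostname with hl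
  by_cases hc : (pvBuild hs).contains l = true
  · simp only [hc, if_true, true_iff]
    rw [PySem.Set.contains_iff, pvMem_build] at hc
    obtain ⟨a, ha, hne, hx⟩ := hc
    exact ⟨a, ha, hne, Or.inl hx⟩
  · rw [if_neg hc]
    rw [List.any_eq_true]
    constructor
    · rintro ⟨p, hp, hcond⟩
      rw [pvMem_enumerate] at hp
      obtain ⟨i, hi, hp1, hp2⟩ := hp
      simp only [Bool.and_eq_true, beq_iff_eq] at hcond
      obtain ⟨hdot, hmem⟩ := hcond
      rw [PySem.Set.contains_iff, pvMem_build] at hmem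
      obtain ⟨a, ha, hne, hx⟩ := hmem
      refine ⟨a, ha, hne, Or.inr ?_⟩
      rw [pvEndswith_dot_iff]
      refine ⟨i, hi, by rw [hp2, hdot], ?_⟩
      have hxl := congrArg String.toList hx
      rw [PySem.Str.toList_slice] at hxl
      simp only [PySem.Chars.slice_eq_listSlice] at hxl
      rw [hp1, PySem.List.slice_from l.toList (by omega : (0:Int) ≤ 0 + (i:Int) + 1)] at hxl
      have hnat : ((0:Int) + (i : Int) + 1).toNat = i + 1 := by omega
      rw [hnat] at hxl
      exact hxl
    · rintro ⟨a, ha, hne, hcase⟩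
      rcases hcase with heq | hend
      · exact absurd (by rw [PySem.Set.contains_iff, pvMem_build]; exact ⟨a, ha, hne, heq⟩) hc
      · rw [pvEndswith_dot_iff] at hend
        obtain ⟨i, hi, hget, hdrop⟩ := hend
        refine ⟨((i : Int), '.'), ?_, ?_⟩
        · rw [pvMem_enumerate]
          exact ⟨i, hi, by omega, hget⟩
        · simp only [beq_self_eq_true, Bool.true_and]
          rw [PySem.Set.contains_iff, pvMem_build]
          refine ⟨a, ha, hne, ?_⟩
          apply String.ext
          rw [PySem.Str.toList_slice]
          simp only [PySem.Chars.slice_eq_listSlice]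
          rw [PySem.List.slice_from l.toList (by omega : (0:Int) ≤ (i:Int) + 1)]
          have hnat : ((i : Int) + 1).toNat = i + 1 := by omega
          rw [hnat, hdrop]

-- ===== VERDICT (by name: the statement is the Claim_ definition above) =====
theorem host_matches_allowlist_py_spec : Claim_equal_host_matches_allowlist_py := by
  intro hostname allowed_hosts _
  unfold Spec_host_matches_allowlist_py host_matches_allowlist_py
  rw [Bool.eq_iff_iff, pvALoop_iff, pvAlt_iff]
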